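-- pv_equiv track=rewrite | github.com/numqi/numqi | project/ws_ame/draft00.py | get_keep_list
-- ===== SOURCE A (Python) =====
-- import itertools
--
-- def get_keep_list(num_party):
--     keep_list = [tuple(x) for x in itertools.combinations(range(num_party), num_party//2)]
--     if num_party % 2 == 0:
--         tmp0 = set(range(num_party))
--         tmp1 = []
--         for x in keep_list:
--             y = tuple(sorted(tmp0 - set(x)))
--             tmp1.append(((x,y) if (min(x)<min(y)) else (y,x)))
--         keep_list = [x[0] for x in sorted(set(tmp1))]
--     return keep_list
-- ===== SOURCE B (Python) =====
-- import itertools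
--
-- def get_keep_list(num_party):
--     # Even: every canonical representative contains 0, so generate only those,
--     # already in lexicographic order -- no complements, no set-dedup, no sort.
--     if num_party % 2 == 0:
--         return [(0,) + rest for rest in itertools.combinations(range(1, num_party), num_party // 2 - 1)]
--     return [tuple(x) for x in itertools.combinations(range(num_party), num_party // 2)]
-- ===== Notes on version B (the rewrite author's own statement) =====
-- stated objective: faster
-- what changed: For even num_party, B directly enumerates only the canonical subsets (those containing party 0) as 0-prefixed combinations of range(1,n), which are already in the final sorted order, eliminating A's complement construction, per-subset min comparison, set-dedup and global sort.
-- outside the precondition, e.g. on get_keep_list(0): A raises ValueError, B raises ValueError; on get_keep_list(-2): A raises ValueError, B raises ValueError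
import Mathlib
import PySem

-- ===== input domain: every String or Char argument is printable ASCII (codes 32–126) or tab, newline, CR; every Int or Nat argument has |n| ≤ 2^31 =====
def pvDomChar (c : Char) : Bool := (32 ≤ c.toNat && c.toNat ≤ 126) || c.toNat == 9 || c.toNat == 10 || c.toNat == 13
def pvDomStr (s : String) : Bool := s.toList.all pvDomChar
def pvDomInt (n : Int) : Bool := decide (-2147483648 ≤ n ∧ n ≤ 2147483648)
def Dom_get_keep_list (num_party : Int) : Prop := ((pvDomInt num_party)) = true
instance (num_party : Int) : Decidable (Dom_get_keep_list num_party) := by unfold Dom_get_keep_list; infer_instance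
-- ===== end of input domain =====

-- B enumerates only the canonical subsets (those containing party 0) directly, skipping
-- A's complement construction, set-dedup and final sort.

-- ===== PORT A =====

-- itertools.combinations(l, r) for a list l, in itertools' order (lexicographic on positions)
def pvCombos : List Int → Nat → List (List Int)
  | _, 0 => [[]]
  | [], _+1 => []
  | x :: xs, r+1 => (pvCombos xs r).map (fun c => x :: c) ++ pvCombos xs (r+1)

-- min(x) for a tuple of ints: exact for nonempty x; Python raises ValueError on empty (outside Pre_)
def pvMin (x : List Int) : Int := (PySem.List.min? x (fun v => v)).getD 0

def get_keep_list (num_party : Int) : List (List Int) :=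
  -- '.toNat': itertools.combinations raises for r < 0, which happens only for num_party < 0 (outside Pre_)
  let keep_list := pvCombos (PySem.List.pyRange 0 num_party 1) (PySem.Int.floordiv num_party 2).toNat
  if PySem.Int.mod num_party 2 == 0 then
    let tmp0 : PySem.Set Int := PySem.Set.ofList (PySem.List.pyRange 0 num_party 1)
    let tmp1 : List (List Int × List Int) := keep_list.foldl (fun acc x =>
      let y := PySem.List.sorted (PySem.Set.diff tmp0 (PySem.Set.ofList x)) (fun v => v)
      acc ++ [if pvMin x < pvMin y then (x, y) else (y, x)]) []
    (PySem.List.sorted2 (PySem.Set.ofList tmp1) (fun p => p.1) (fun p => p.2)).map (fun p => p.1)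
  else keep_list

-- ===== PORT B =====

-- itertools.combinations(l, r), as called by Source B
def pvCombosAlt : List Int → Nat → List (List Int)
  | _, 0 => [[]]
  | [], _+1 => []
  | x :: xs, r+1 => (pvCombosAlt xs r).map (fun c => x :: c) ++ pvCombosAlt xs (r+1)

def get_keep_list_alt (num_party : Int) : List (List Int) :=
  if PySem.Int.mod num_party 2 == 0 then
    (pvCombosAlt (PySem.List.pyRange 1 num_party 1) (PySem.Int.floordiv num_party 2 - 1).toNat).map
      (fun rest => 0 :: rest)
  else
    pvCombosAlt (PySem.List.pyRange 0 num_party 1) (PySem.Int.floordiv num_party 2).toNat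

-- ===== PRECONDITION & SPEC =====
-- Pre_ excludes exactly num_party ≤ 0, where Python A raises ValueError
-- (min(()) at num_party = 0; combinations with negative r for num_party < 0).
def Pre_get_keep_list (num_party : Int) : Prop := 1 ≤ num_party
instance (num_party : Int) : Decidable (Pre_get_keep_list num_party) := by
  unfold Pre_get_keep_list; infer_instance

def pvWitness_get_keep_list : Int := 4

def Spec_get_keep_list (num_party : Int) (out : List (List Int)) : Prop := out = get_keep_list_alt num_party
instance (num_party : Int) (out : List (List Int)) : Decidable (Spec_get_keep_list num_party out) := by unfold Spec_get_keep_list; infer_instance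

-- ===== CLAIM (what is proved, stated in full; the proofs are below) =====
def Claim_equal_get_keep_list : Prop := ∀ (num_party : Int), Dom_get_keep_list num_party → Pre_get_keep_list num_party → Spec_get_keep_list num_party (get_keep_list num_party)

-- ===== LEMMAS AND PROOFS =====

theorem pvCombosAlt_eq (l : List Int) (r : Nat) : pvCombosAlt l r = pvCombos l r := by
  induction l generalizing r with
  | nil => cases r <;> rfl
  | cons x xs ih => cases r with
    | zero => rfl
    | succ r => simp [pvCombos, pvCombosAlt, ih]

theorem pvCombos_length {c l : List Int} {r : Nat} (h : c ∈ pvCombos l r) : c.length = r := by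
  induction l generalizing c r with
  | nil => cases r with
    | zero => simp [pvCombos] at h; simp [h]
    | succ r => simp [pvCombos] at h
  | cons x xs ih =>
    cases r with
    | zero => simp [pvCombos] at h; simp [h]
    | succ r =>
      simp only [pvCombos, List.mem_append, List.mem_map] at h
      rcases h with ⟨c', hc', rfl⟩ | h
      · simp [ih hc']
      · exact ih h

theorem pvCombos_sublist {c l : List Int} {r : Nat} (h : c ∈ pvCombos l r) : c.Sublist l := by
  induction l generalizing c r with
  | nil => cases r with
    | zero => simp [pvCombos] at h; simp [h]
    | succ r => simp [pvCombos] at h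
  | cons x xs ih =>
    cases r with
    | zero => simp [pvCombos] at h; simp [h]
    | succ r =>
      simp only [pvCombos, List.mem_append, List.mem_map] at h
      rcases h with ⟨c', hc', rfl⟩ | h
      · exact (ih hc').cons₂ x
      · exact (ih h).cons x

theorem mem_pvCombos {c l : List Int} {r : Nat} (hs : c.Sublist l) (hr : c.length = r) :
    c ∈ pvCombos l r := by
  induction l generalizing c r with
  | nil =>
    rw [List.sublist_nil] at hs
    subst hs; simp at hr; subst hr; simp [pvCombos]
  | cons x xs ih =>
    cases r with
    | zero =>
      rw [List.length_eq_zero_iff] at hr; subst hr; simp [pvCombos]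
    | succ r =>
      rcases List.sublist_cons_iff.mp hs with h | ⟨c', rfl, hc'⟩
      · simp only [pvCombos, List.mem_append]
        exact Or.inr (ih h hr)
      · simp only [pvCombos, List.mem_append, List.mem_map]
        exact Or.inl ⟨c', ih hc' (by simpa using hr), rfl⟩

theorem pvCombos_pairwise {l : List Int} (hl : l.Pairwise (· < ·)) (r : Nat) :
    (pvCombos l r).Pairwise (· < ·) := by
  induction l generalizing r with
  | nil => cases r <;> simp [pvCombos]
  | cons x xs ih =>
    cases r with
    | zero => simp [pvCombos]
    | succ r =>
      have hx : ∀ y ∈ xs, x < y := fun y hy => (List.pairwise_cons.mp hl).1 y hy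
      have hxs : xs.Pairwise (· < ·) := (List.pairwise_cons.mp hl).2
      simp only [pvCombos]
      apply List.pairwise_append.mpr
      refine ⟨?_, ih hxs (r+1), ?_⟩
      · exact (List.pairwise_map).mpr ((ih hxs r).imp fun h => List.Lex.cons h)
      · intro a ha b hb
        rcases List.mem_map.mp ha with ⟨a', _, rfl⟩
        have hblen : b.length = r + 1 := pvCombos_length hb
        cases b with
        | nil => simp at hblen
        | cons y b' =>
          have hy : y ∈ xs := (pvCombos_sublist hb).subset (by simp)
          exact List.Lex.rel (hx y hy)

theorem pv_filter_mem {x l : List Int} (hs : x.Sublist l) (hnd : l.Nodup) :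
    l.filter (fun a => decide (a ∈ x)) = x := by
  induction hs with
  | slnil => simp
  | @cons l₁ l₂ a h ih =>
    have hal : a ∉ l₁ := fun hmem => (List.nodup_cons.mp hnd).1 (h.subset hmem)
    rw [List.filter_cons, if_neg (by simpa using hal)]
    exact ih (List.nodup_cons.mp hnd).2
  | @cons₂ l₁ l₂ a h ih =>
    have hal2 : a ∉ l₂ := (List.nodup_cons.mp hnd).1
    rw [List.filter_cons, if_pos (by simp)]
    congr 1
    rw [List.filter_congr (fun b hb => ?_), ih (List.nodup_cons.mp hnd).2]
    have : b ≠ a := fun hba => hal2 (hba ▸ hb)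
    simp [this]

theorem pv_foldl_append_map {α β : Type} (g : α → β) (l : List α) (acc : List β) :
    l.foldl (fun acc x => acc ++ [g x]) acc = acc ++ l.map g := by
  induction l generalizing acc with
  | nil => simp
  | cons x xs ih => simp [List.foldl_cons, ih, List.append_assoc]

theorem pv_ofList_append_absorb {α : Type} [BEq α] [LawfulBEq α] (l1 l2 : List α)
    (h1 : l1.Nodup) (h2 : ∀ e ∈ l2, e ∈ l1) : PySem.Set.ofList (l1 ++ l2) = l1 := by
  rw [PySem.Set.ofList_append, PySem.Set.ofList_eq_self_of_nodup l1 h1,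
    PySem.Set.update_eq_append_filter]
  have : List.filter (fun y => !PySem.Set.contains l1 y) (PySem.Set.ofList l2) = [] := by
    apply List.filter_eq_nil_iff.mpr
    intro y hy
    have : y ∈ l1 := h2 y ((PySem.Set.mem_ofList l2 y).mp hy)
    simp [PySem.Set.contains, this]
  rw [this, List.append_nil]

theorem pv_sorted2_eq_self {α κ₁ κ₂ : Type} [LT κ₁] [DecidableLT κ₁] [LT κ₂] [DecidableLT κ₂]
    (xs : List α) (k1 : α → κ₁) (k2 : α → κ₂)
    (hasym : ∀ a b : α, k1 a < k1 b → ¬ k1 b < k1 a)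
    (h : xs.Pairwise (fun a b => k1 a < k1 b)) :
    PySem.List.sorted2 xs k1 k2 = xs := by
  induction xs using List.reverseRecOn with
  | nil => rfl
  | append_singleton ys x ih =>
    have hp := List.pairwise_append.mp h
    have hys := hp.1
    have hcross : ∀ y ∈ ys, k1 y < k1 x := fun y hy => hp.2.2 y hy x (by simp)
    show List.foldl _ [] (ys ++ [x]) = ys ++ [x]
    rw [List.foldl_append, List.foldl_cons, List.foldl_nil]
    have hys_eq : List.foldl (fun acc a => PySem.List.insertBy _ a acc) [] ys = ys := ih hys
    rw [hys_eq]
    apply PySem.List.insertBy_of_forall_not_before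
    intro y hy
    have h1 : ¬ (k1 x < k1 y) := hasym y x (hcross y hy)
    have h2 : k1 y < k1 x := hcross y hy
    simp [h1, h2]

theorem pvMin_cons_zero (x' : List Int) (h : ∀ a ∈ x', 1 ≤ a) : pvMin (0 :: x') = 0 := by
  unfold pvMin
  rcases hm : PySem.List.min? (0 :: x') (fun v => v) with _ | m
  · simp [PySem.List.min?_eq_none_iff] at hm
  · have hmem := PySem.List.min?_mem hm
    have hle : m ≤ 0 := PySem.List.min?_isMin hm 0 (by simp)
    have : m = 0 := by
      rcases (List.mem_cons.mp hmem) with rfl | hmem'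
      · rfl
      · exact absurd hle (by have := h m hmem'; omega)
    simp [this]

theorem pvMin_pos (x : List Int) (hne : x ≠ []) (h : ∀ a ∈ x, 1 ≤ a) : 1 ≤ pvMin x := by
  unfold pvMin
  rcases hm : PySem.List.min? x (fun v => v) with _ | m
  · exact absurd ((PySem.List.min?_eq_none_iff x _).mp hm) hne
  · simpa using h m (PySem.List.min?_mem hm)

-- The even case: num_party = 2*(k'+1).
theorem pv_even_case (n : Int) (k' : Nat) (hn : n = 2 * ((k' : Int) + 1)) :
    get_keep_list n = get_keep_list_alt n := by
  have hnpos : (0:Int) < n := by omega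
  have hR : PySem.List.pyRange 0 n 1 = 0 :: PySem.List.pyRange 1 n 1 :=
    PySem.List.pyRange_one_cons hnpos
  have hmod : PySem.Int.mod n 2 = 0 := by
    have := @Int.fmod_eq_emod n 2; simp [PySem.Int.mod]; omega
  have hdiv : (PySem.Int.floordiv n 2).toNat = k' + 1 := by
    have := @Int.fdiv_eq_ediv n 2; simp [PySem.Int.floordiv]; omega
  have hdiv1 : (PySem.Int.floordiv n 2 - 1).toNat = k' := by
    have := @Int.fdiv_eq_ediv n 2; simp [PySem.Int.floordiv]; omega
  -- facts about T = pyRange 1 n 1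
  set T := PySem.List.pyRange 1 n 1 with hTdef
  have hT1 : ∀ a ∈ T, 1 ≤ a := fun a ha => (PySem.List.mem_pyRange_one.mp ha).1
  have hTpw : T.Pairwise (· < ·) := PySem.List.pairwise_lt_pyRange_one 1 n
  have hTnd : T.Nodup := PySem.List.nodup_pyRange_one 1 n
  have hTlen : T.length = 2 * k' + 1 := by
    rw [hTdef, PySem.List.length_pyRange_one]; omega
  have hRnd : (0 :: T).Nodup := by rw [← hR]; exact PySem.List.nodup_pyRange_one 0 n
  have hofR : PySem.Set.ofList ((0:Int) :: T) = (0:Int) :: T :=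
    PySem.Set.ofList_eq_self_of_nodup _ hRnd
  simp only [get_keep_list, get_keep_list_alt, hmod, hdiv, hdiv1, hR, beq_self_eq_true, if_true,
    pvCombosAlt_eq]
  rw [hofR]
  -- the complement expression, cleaned up
  have hcomp : ∀ x : List Int,
      PySem.List.sorted (PySem.Set.diff ((0:Int) :: T) (PySem.Set.ofList x)) (fun v => v)
        = ((0:Int) :: T).filter (fun a => !decide (a ∈ x)) := by
    intro x
    have hdiff : PySem.Set.diff ((0:Int) :: T) (PySem.Set.ofList x)
        = ((0:Int) :: T).filter (fun a => !decide (a ∈ x)) := by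
      show List.filter _ _ = _
      apply List.filter_congr
      intro a _
      simp [PySem.Set.contains]
    rw [hdiff]
    apply PySem.List.sorted_eq_self_of_pairwise
    have : ((0:Int) :: T).Pairwise (· < ·) := by
      rw [← hR]; exact PySem.List.pairwise_lt_pyRange_one 0 n
    exact (this.filter _).imp le_of_lt
  simp only [hcomp]
  -- the loop body appends one element per x: it is a map
  rw [pv_foldl_append_map (fun x : List Int =>
    if pvMin x < pvMin (((0:Int) :: T).filter (fun a => !decide (a ∈ x)))
    then (x, ((0:Int) :: T).filter (fun a => !decide (a ∈ x)))
    else (((0:Int) :: T).filter (fun a => !decide (a ∈ x)), x))]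
  rw [List.nil_append]
  -- generic facts about complements within T
  have hfiltlen : ∀ c : List Int, c.Sublist T →
      (T.filter (fun a => !decide (a ∈ c))).length = 2*k'+1 - c.length := by
    intro c hsub
    have h0 := List.length_eq_length_filter_add (l := T) (fun a => decide (a ∈ c))
    rw [pv_filter_mem hsub hTnd] at h0
    omega
  -- value of the loop body on a first-half element 0 :: x'
  have hgFH : ∀ x' ∈ pvCombos T k',
      (if pvMin ((0:Int)::x') < pvMin (List.filter (fun a => !decide (a ∈ (0:Int)::x')) ((0:Int) :: T)) then
        ((0:Int)::x', List.filter (fun a => !decide (a ∈ (0:Int)::x')) ((0:Int) :: T))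
      else (List.filter (fun a => !decide (a ∈ (0:Int)::x')) ((0:Int) :: T), (0:Int)::x'))
      = ((0:Int)::x', T.filter (fun a => !decide (a ∈ x'))) := by
    intro x' hx'
    have hsub : x'.Sublist T := pvCombos_sublist hx'
    have hlen : x'.length = k' := pvCombos_length hx'
    have h1 : ∀ a ∈ x', 1 ≤ a := fun a ha => hT1 a (hsub.subset ha)
    have hfc : List.filter (fun a => !decide (a ∈ (0:Int)::x')) ((0:Int) :: T)
        = T.filter (fun a => !decide (a ∈ x')) := by
      rw [List.filter_cons_of_neg (by simp)]
      apply List.filter_congr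
      intro a ha
      have : a ≠ 0 := by have := hT1 a ha; omega
      simp [this]
    rw [hfc]
    have hmin1 : pvMin ((0:Int)::x') = 0 := pvMin_cons_zero x' h1
    have hne : T.filter (fun a => !decide (a ∈ x')) ≠ [] := by
      have := hfiltlen x' hsub
      intro hnil; rw [hnil] at this; simp at this; omega
    have hmin2 : 1 ≤ pvMin (T.filter (fun a => !decide (a ∈ x'))) :=
      pvMin_pos _ hne (fun a ha => hT1 a (List.mem_of_mem_filter ha))
    rw [if_pos (by omega)]
  -- value of the loop body on a second-half element c
  have hgSH : ∀ c ∈ pvCombos T (k'+1),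
      (if pvMin c < pvMin (List.filter (fun a => !decide (a ∈ c)) ((0:Int) :: T)) then
        (c, List.filter (fun a => !decide (a ∈ c)) ((0:Int) :: T))
      else (List.filter (fun a => !decide (a ∈ c)) ((0:Int) :: T), c))
      = ((0:Int) :: T.filter (fun a => !decide (a ∈ c)), c) := by
    intro c hc
    have hsub : c.Sublist T := pvCombos_sublist hc
    have hlen : c.length = k'+1 := pvCombos_length hc
    have h1 : ∀ a ∈ c, 1 ≤ a := fun a ha => hT1 a (hsub.subset ha)
    have h0c : (0:Int) ∉ c := fun h => by have := h1 0 h; omega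
    have hfc : List.filter (fun a => !decide (a ∈ c)) ((0:Int) :: T)
        = (0:Int) :: T.filter (fun a => !decide (a ∈ c)) := by
      rw [List.filter_cons_of_pos (by simp [h0c])]
    rw [hfc]
    have hne : c ≠ [] := by intro h; rw [h] at hlen; simp at hlen
    have hmin1 : 1 ≤ pvMin c := pvMin_pos c hne h1
    have hmin2 : pvMin ((0:Int) :: T.filter (fun a => !decide (a ∈ c))) = 0 :=
      pvMin_cons_zero _ (fun a ha => hT1 a (List.mem_of_mem_filter ha))
    rw [if_neg (by omega)]
  -- split the combinations of 0 :: T by whether they contain 0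
  have hsplit : pvCombos ((0:Int) :: T) (k'+1)
      = (pvCombos T k').map (fun c => (0:Int) :: c) ++ pvCombos T (k'+1) := rfl
  rw [hsplit, List.map_append]
  have e1 : List.map
      (fun x => if pvMin x < pvMin (List.filter (fun a => !decide (a ∈ x)) ((0:Int) :: T)) then
          (x, List.filter (fun a => !decide (a ∈ x)) ((0:Int) :: T))
        else (List.filter (fun a => !decide (a ∈ x)) ((0:Int) :: T), x))
      (List.map (fun c => (0:Int) :: c) (pvCombos T k'))
      = List.map (fun x' => ((0:Int) :: x', List.filter (fun a => !decide (a ∈ x')) T))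
          (pvCombos T k') := by
    rw [List.map_map]
    exact List.map_congr_left (fun x' hx' => hgFH x' hx')
  have e2 : List.map
      (fun x => if pvMin x < pvMin (List.filter (fun a => !decide (a ∈ x)) ((0:Int) :: T)) then
          (x, List.filter (fun a => !decide (a ∈ x)) ((0:Int) :: T))
        else (List.filter (fun a => !decide (a ∈ x)) ((0:Int) :: T), x))
      (pvCombos T (k'+1))
      = List.map (fun c => ((0:Int) :: List.filter (fun a => !decide (a ∈ c)) T, c))
          (pvCombos T (k'+1)) :=
    List.map_congr_left (fun c hc => hgSH c hc)
  rw [e1, e2]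
  -- duplicates: every second-half pair already occurs among the first-half pairs
  have hnd1 : (List.map (fun x' => ((0:Int) :: x', List.filter (fun a => !decide (a ∈ x')) T))
      (pvCombos T k')).Nodup := by
    have hcnd : (pvCombos T k').Nodup := (pvCombos_pairwise hTpw k').imp (fun h => ne_of_lt h)
    exact hcnd.map (fun a b hab => by have := congrArg Prod.fst hab; simpa using this)
  have hmem2 : ∀ e ∈ List.map (fun c => ((0:Int) :: List.filter (fun a => !decide (a ∈ c)) T, c))
      (pvCombos T (k'+1)),
      e ∈ List.map (fun x' => ((0:Int) :: x', List.filter (fun a => !decide (a ∈ x')) T))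
        (pvCombos T k') := by
    intro e he
    obtain ⟨c, hc, rfl⟩ := List.mem_map.mp he
    have hsubc : c.Sublist T := pvCombos_sublist hc
    have hlenc : c.length = k'+1 := pvCombos_length hc
    have hdmem : List.filter (fun a => !decide (a ∈ c)) T ∈ pvCombos T k' := by
      apply mem_pvCombos List.filter_sublist
      rw [hfiltlen c hsubc]; omega
    have hWd : List.filter (fun a => !decide (a ∈ List.filter (fun a => !decide (a ∈ c)) T)) T
        = c := by
      have hstep : ∀ a ∈ T,
          (!decide (a ∈ List.filter (fun a => !decide (a ∈ c)) T)) = decide (a ∈ c) := by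
        intro a ha
        by_cases hac : a ∈ c
        · simp [List.mem_filter, hac]
        · simp [List.mem_filter, hac, ha]
      rw [List.filter_congr hstep, pv_filter_mem hsubc hTnd]
    exact List.mem_map.mpr ⟨List.filter (fun a => !decide (a ∈ c)) T, hdmem, by rw [hWd]⟩
  rw [pv_ofList_append_absorb _ _ hnd1 hmem2]
  -- the surviving pairs are already strictly increasing on their first component
  have hsor : PySem.List.sorted2
      (List.map (fun x' => ((0:Int) :: x', List.filter (fun a => !decide (a ∈ x')) T))
        (pvCombos T k')) (fun p => p.1) (fun p => p.2)
      = List.map (fun x' => ((0:Int) :: x', List.filter (fun a => !decide (a ∈ x')) T))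
          (pvCombos T k') := by
    apply pv_sorted2_eq_self _ _ _ (fun a b hab hba => absurd hba (lt_asymm hab))
    exact List.pairwise_map.mpr ((pvCombos_pairwise hTpw k').imp (fun h => List.Lex.cons h))
  rw [hsor, List.map_map]
  exact List.map_congr_left (fun a ha => rfl)

theorem get_keep_list_cases (num_party : Int) (hpre : 1 ≤ num_party) :
    get_keep_list num_party = get_keep_list_alt num_party := by
  by_cases heven : PySem.Int.mod num_party 2 = 0
  · have hemod : num_party % 2 = 0 := by
      have := @Int.fmod_eq_emod num_party 2
      simp [PySem.Int.mod] at heven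
      omega
    obtain ⟨k', hk'⟩ : ∃ k' : Nat, num_party = 2 * ((k' : Int) + 1) := by
      refine ⟨(num_party / 2 - 1).toNat, ?_⟩
      omega
    exact pv_even_case num_party k' hk'
  · -- odd branch: both ports are literally the same expression
    unfold get_keep_list get_keep_list_alt
    simp only [beq_iff_eq, heven, ite_false, pvCombosAlt_eq]

-- ===== VERDICT (by name: the statement is the Claim_ definition above) =====
theorem get_keep_list_spec : Claim_equal_get_keep_list := by
  intro num_party _ hpre
  exact get_keep_list_cases num_party hpre
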